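-- pv_equiv track=rewrite | github.com/HaKaTaHan/- | LV.3/숫자 게임.py | solution
-- ===== SOURCE A (Python) =====
-- def solution(A, B):
--     answer = 0
--     A.sort()
--     B.sort()
--     k=0
--     for a in A:
--         for i in range(len(B)-k):
--             if B[0] > a:
--                 answer += 1
--                 B.remove(B[0])
--                 break
--             else:
--                 temp = B.pop(0)
--                 B.append(temp)
--                 k+=1
--
--     return answer
-- ===== SOURCE B (Python) =====
-- def solution(A, B):
--     a_sorted = sorted(A)
--     b_sorted = sorted(B)
--     n = len(b_sorted)
--     count = 0
--     j = 0
--     for a in a_sorted: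
--         while j < n and b_sorted[j] <= a:
--             j += 1
--         if j == n:
--             break
--         count += 1
--         j += 1
--     return count
-- ===== Notes on version B (the rewrite author's own statement) =====
-- stated objective: faster
-- what changed: Replaced the nested scan that rotates/removes elements of a mutated B (O(n) remove/pop/append inside a loop) by a single two-pointer pass over the two sorted copies.
import Mathlib
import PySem

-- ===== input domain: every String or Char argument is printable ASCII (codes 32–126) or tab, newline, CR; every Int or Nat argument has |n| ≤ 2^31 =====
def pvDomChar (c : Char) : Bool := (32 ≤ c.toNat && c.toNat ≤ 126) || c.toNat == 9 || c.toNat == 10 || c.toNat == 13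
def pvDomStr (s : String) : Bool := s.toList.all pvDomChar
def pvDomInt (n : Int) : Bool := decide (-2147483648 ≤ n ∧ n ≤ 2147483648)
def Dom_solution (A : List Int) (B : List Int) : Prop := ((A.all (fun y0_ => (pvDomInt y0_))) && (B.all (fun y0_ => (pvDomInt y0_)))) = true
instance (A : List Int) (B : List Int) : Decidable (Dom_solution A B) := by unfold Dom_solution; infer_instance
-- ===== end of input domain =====

-- B replaces A's nested rotate/remove scan of a mutated B by one two-pointer pass over the
-- sorted copies (asymptotically faster). A mutates its arguments in place (sorts A and B and
-- removes/rotates elements of B); B does not — the equivalence proved is about the RETURN value.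

-- ===== PORT A =====
-- inner 'for i in range(len(B)-k)' loop of A: state (B, k, answer); fuel is the range length,
-- computed once before the loop.  The '[]' case is unreachable (Python would raise IndexError
-- on B[0], but the range bound never exceeds the number of elements present).
def solLoopA : Nat → Int → List Int → Int → Int → (List Int × Int × Int)
  | 0, _, Bc, k, ans => (Bc, k, ans)
  | _ + 1, _, [], k, ans => ([], k, ans)  -- unreachable
  | f + 1, a, b0 :: rest, k, ans =>
    if b0 > a then
      -- answer += 1; B.remove(B[0]) (first occurrence of the value B[0] is index 0); break
      (rest, k, ans + 1)
    else
      -- temp = B.pop(0); B.append(temp); k += 1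
      solLoopA f a (rest ++ [b0]) (k + 1) ans

def solution (A : List Int) (B : List Int) : Int :=
  let As := PySem.List.sorted A (fun x => x) false
  let B0 := PySem.List.sorted B (fun x => x) false
  let st := As.foldl
    (fun (st : List Int × Int × Int) a =>
      solLoopA (((st.1.length : Int) - st.2.1).toNat) a st.1 st.2.1 st.2.2)
    (B0, 0, 0)
  st.2.2

-- ===== PORT B =====
-- 'while j < n and b_sorted[j] <= a: j += 1'
def solSkip (bs : List Int) (a : Int) (j : Nat) : Nat :=
  if h : j < bs.length then
    if bs[j] ≤ a then solSkip bs a (j + 1) else j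
  else j
termination_by bs.length - j

-- 'for a in a_sorted: …' with the break ('if j == n: break') and the running count
def solGoB (bs : List Int) : List Int → Nat → Int → Int
  | [], _, c => c
  | a :: as, j, c =>
    let j' := solSkip bs a j
    if j' = bs.length then c
    else solGoB bs as (j' + 1) (c + 1)

def solution_alt (A : List Int) (B : List Int) : Int :=
  solGoB (PySem.List.sorted B (fun x => x) false) (PySem.List.sorted A (fun x => x) false) 0 0

-- ===== PRECONDITION & SPEC =====
def Spec_solution (A : List Int) (B : List Int) (out : Int) : Prop := out = solution_alt A B
instance (A : List Int) (B : List Int) (out : Int) : Decidable (Spec_solution A B out) := by unfold Spec_solution; infer_instance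

-- ===== CLAIM (what is proved, stated in full; the proofs are below) =====
def Claim_equal_solution : Prop := ∀ (A : List Int) (B : List Int), Dom_solution A B → Spec_solution A B (solution A B)

-- ===== LEMMAS AND PROOFS =====

theorem solSkip_ge (bs : List Int) (a : Int) (j : Nat) : j ≤ solSkip bs a j := by
  unfold solSkip
  split
  · split
    · exact le_trans (Nat.le_succ j) (solSkip_ge bs a (j + 1))
    · exact le_refl j
  · exact le_refl j
termination_by bs.length - j

theorem solSkip_le (bs : List Int) (a : Int) (j : Nat) (h : j ≤ bs.length) :
    solSkip bs a j ≤ bs.length := by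
  unfold solSkip
  split
  · split
    · exact solSkip_le bs a (j + 1) (by omega)
    · exact h
  · exact h
termination_by bs.length - j

-- inner-loop characterisation: running A's inner loop with fuel n - j on (drop j bs ++ R)
-- skips exactly what solSkip skips; the rotated-away elements land in some R' of the stated length.
theorem inner_eq (bs : List Int) (a : Int) :
    ∀ fj j, fj = bs.length - j → j ≤ bs.length → ∀ (R : List Int) (ans : Int),
    ∃ R' : List Int,
      solLoopA (bs.length - j) a (bs.drop j ++ R) (R.length : Int) ans =
        (if solSkip bs a j < bs.length
         then (bs.drop (solSkip bs a j + 1) ++ R', (R'.length : Int), ans + 1)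
         else (R', (R'.length : Int), ans)) ∧
      R'.length = R.length + (solSkip bs a j - j) := by
  intro fj
  induction fj with
  | zero =>
    intro j hfj hj R ans
    have hjn : j = bs.length := by omega
    subst hjn
    refine ⟨R, ?_, ?_⟩
    · simp [solLoopA, solSkip]
    · unfold solSkip; simp
  | succ f ih =>
    intro j hfj hj R ans
    have hjlt : j < bs.length := by omega
    obtain ⟨b0, hb0⟩ : ∃ b0, bs[j]! = b0 := ⟨_, rfl⟩
    have hget : bs[j]'hjlt = b0 := by simpa [getElem!_pos bs j hjlt] using hb0
    have hdrop : bs.drop j = b0 :: bs.drop (j + 1) := by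
      rw [List.drop_eq_getElem_cons hjlt, hget]
    by_cases hba : b0 > a
    · -- match: break after removal
      have hskip : solSkip bs a j = j := by
        unfold solSkip; simp [hjlt, hget]; omega
      refine ⟨R, ?_, by omega⟩
      have hstep : bs.length - j = (bs.length - (j+1)) + 1 := by omega
      rw [hstep, hdrop]
      simp only [List.cons_append, solLoopA]
      rw [if_pos hba, hskip, if_pos hjlt]
    · -- rotate and continue
      have hle : b0 ≤ a := by omega
      have hskip : solSkip bs a j = solSkip bs a (j + 1) := by
        conv_lhs => unfold solSkip
        simp [hjlt, hget, hle]
      obtain ⟨R', hR', hlen⟩ := ih (j + 1) (by omega) (by omega) (R ++ [b0]) ans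
      have hge : j + 1 ≤ solSkip bs a (j + 1) := solSkip_ge bs a (j + 1)
      refine ⟨R', ?_, by simp at hlen; omega⟩
      have hstep : bs.length - j = (bs.length - (j + 1)) + 1 := by omega
      rw [hstep, hdrop]
      simp only [solLoopA, if_neg (by omega : ¬ b0 > a), List.cons_append]
      have harr : bs.drop (j + 1) ++ R ++ [b0] = bs.drop (j + 1) ++ (R ++ [b0]) := by
        simp
      have hk : (R.length : Int) + 1 = ((R ++ [b0]).length : Int) := by simp
      rw [harr, hk, hR', hskip]

-- once the fuel is exhausted for good (state (R, |R|, ans)), the remaining outer iterations do nothing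
theorem outer_stuck (R : List Int) (ans : Int) :
    ∀ as : List Int,
      (as.foldl (fun (st : List Int × Int × Int) a =>
        solLoopA (((st.1.length : Int) - st.2.1).toNat) a st.1 st.2.1 st.2.2)
        (R, (R.length : Int), ans)) = (R, (R.length : Int), ans) := by
  intro as
  induction as with
  | nil => rfl
  | cons a as ih =>
    simp only [List.foldl_cons]
    have : (((R.length : Int) - (R.length : Int)).toNat) = 0 := by simp
    simpa [this, solLoopA] using ih

-- outer-loop invariant: A's fold from (drop j bs ++ R, |R|, ans) computes solGoB bs as j ans
theorem outer_eq (bs : List Int) :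
    ∀ (as : List Int) (j : Nat) (R : List Int) (ans : Int), j ≤ bs.length →
      (as.foldl (fun (st : List Int × Int × Int) a =>
        solLoopA (((st.1.length : Int) - st.2.1).toNat) a st.1 st.2.1 st.2.2)
        (bs.drop j ++ R, (R.length : Int), ans)).2.2 = solGoB bs as j ans := by
  intro as
  induction as with
  | nil => intro j R ans hj; rfl
  | cons a as ih =>
    intro j R ans hj
    have hfuel : ((((bs.drop j ++ R).length : Int) - (R.length : Int)).toNat) = bs.length - j := by
      simp [List.length_drop]
    obtain ⟨R', hR', hlen⟩ := inner_eq bs a (bs.length - j) j rfl hj R ans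
    have hle := solSkip_le bs a j hj
    simp only [List.foldl_cons, hfuel, hR']
    by_cases hlt : solSkip bs a j < bs.length
    · rw [if_pos hlt]
      rw [ih (solSkip bs a j + 1) R' (ans + 1) (by omega)]
      have hne : ¬ solSkip bs a j = bs.length := by omega
      simp only [solGoB, if_neg hne]
    · rw [if_neg hlt]
      have hskipn : solSkip bs a j = bs.length := by omega
      rw [outer_stuck R' ans as]
      simp only [solGoB, if_pos hskipn]

-- ===== VERDICT (by name: the statement is the Claim_ definition above) =====
theorem solution_spec : Claim_equal_solution := by
  intro A B _
  unfold Spec_solution solution solution_alt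
  have := outer_eq (PySem.List.sorted B (fun x => x) false)
    (PySem.List.sorted A (fun x => x) false) 0 [] 0 (Nat.zero_le _)
  simpa using this
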